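-- pv_equiv track=rewrite | github.com/xioxet/THE-SHRINE | inf1002/inf1002_lab/yq_lab_3/CountLetters.py | double_count
-- ===== SOURCE A (Python) =====
-- def letter_count(tmpStr):
--       letter_dict = {}
--       for letter in tmpStr:
--             if letter in letter_dict:
--                   letter_dict[letter] += 1
--             else:
--                   letter_dict[letter] = 1
--       return letter_dict
--
-- def double_count(str1, str2):
--       first_dict = letter_count(str1)
--       second_dict = letter_count(str2)
--
--       for key, value in second_dict.items():
--             if key in first_dict:
--                   first_dict[key] += value
--             else:
--                   first_dict[key] = value
--
--       return first_dict
-- ===== SOURCE B (Python) =====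
-- def double_count(str1, str2):
--       counts = {}
--       for letter in str1 + str2:
--             if letter in counts:
--                   counts[letter] += 1
--             else:
--                   counts[letter] = 1
--       return counts
-- ===== Notes on version B (the rewrite author's own statement) =====
-- stated objective: simpler
-- what changed: Replaces A's two separate per-string counting passes plus a third dict-merge loop over the second dict's items with a single counting pass over the concatenation str1 + str2 into one dict.
import Mathlib
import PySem

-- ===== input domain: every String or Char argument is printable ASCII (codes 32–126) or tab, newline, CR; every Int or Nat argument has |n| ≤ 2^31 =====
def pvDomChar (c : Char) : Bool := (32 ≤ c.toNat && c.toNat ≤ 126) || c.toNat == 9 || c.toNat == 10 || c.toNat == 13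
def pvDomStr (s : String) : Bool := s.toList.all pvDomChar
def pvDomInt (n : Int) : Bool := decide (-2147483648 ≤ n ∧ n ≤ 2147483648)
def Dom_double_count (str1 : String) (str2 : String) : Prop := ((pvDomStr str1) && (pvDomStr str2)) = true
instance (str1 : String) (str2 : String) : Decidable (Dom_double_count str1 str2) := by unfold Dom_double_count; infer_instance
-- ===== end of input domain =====

-- B replaces A's two per-string counting passes plus a dict-merge loop with one counting pass over str1 + str2 (simpler, same cost).


-- ===== PORT A =====
-- one Python loop iteration of letter_count: if letter in d: d[letter] += 1 else: d[letter] = 1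
def lcStep (d : PySem.Dict String Int) (letter : String) : PySem.Dict String Int :=
  if d.contains letter then d.insert letter (d.getD letter 0 + 1) else d.insert letter 1

def letter_count (tmpStr : String) : PySem.Dict String Int :=
  (tmpStr.toList.map (fun c => c.toString)).foldl lcStep PySem.Dict.empty

-- one iteration of A's merge loop over second_dict.items()
def mergeStep (d : PySem.Dict String Int) (p : String × Int) : PySem.Dict String Int :=
  if d.contains p.1 then d.insert p.1 (d.getD p.1 0 + p.2) else d.insert p.1 p.2

def double_count (str1 : String) (str2 : String) : List (String × Int) :=
  let first_dict := letter_count str1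
  let second_dict := letter_count str2
  (second_dict.items.foldl mergeStep first_dict).items

-- ===== PORT B =====
def double_count_alt (str1 : String) (str2 : String) : List (String × Int) :=
  (((str1.toList ++ str2.toList).map (fun c => c.toString)).foldl
    (fun counts letter =>
      if counts.contains letter then counts.insert letter (counts.getD letter 0 + 1)
      else counts.insert letter 1)
    PySem.Dict.empty).items

-- ===== PRECONDITION & SPEC =====
def Spec_double_count (str1 : String) (str2 : String) (out : List (String × Int)) : Prop := out = double_count_alt str1 str2
instance (str1 : String) (str2 : String) (out : List (String × Int)) : Decidable (Spec_double_count str1 str2 out) := by unfold Spec_double_count; infer_instance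

-- ===== CLAIM (what is proved, stated in full; the proofs are below) =====
def Claim_equal_double_count : Prop := ∀ (str1 : String) (str2 : String), Dom_double_count str1 str2 → Spec_double_count str1 str2 (double_count str1 str2)

-- ===== LEMMAS AND PROOFS =====

-- both branch-shaped steps are the same insert
theorem lcStep_eq (d : PySem.Dict String Int) (k : String) :
    lcStep d k = d.insert k (d.getD k 0 + 1) := by
  unfold lcStep
  split
  · rfl
  · rename_i h
    rw [PySem.Dict.getD_of_not_contains d 0 (by simp [h])]
    norm_num

theorem mergeStep_eq (d : PySem.Dict String Int) (p : String × Int) :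
    mergeStep d p = d.insert p.1 (d.getD p.1 0 + p.2) := by
  unfold mergeStep
  split
  · rfl
  · rename_i h
    rw [PySem.Dict.getD_of_not_contains d 0 (by simp [h])]
    norm_num

theorem lcStep_funext : lcStep = fun d k => PySem.Dict.insert d k (d.getD k 0 + 1) :=
  funext fun d => funext fun k => lcStep_eq d k

theorem letter_count_eq (s : String) :
    letter_count s = PySem.Dict.counter (s.toList.map (fun c => c.toString)) := by
  unfold letter_count
  rw [lcStep_funext, PySem.Dict.foldl_insert_getD_add_one_eq_counter]

-- lookup after folding a merge over an arbitrary pair list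
theorem getD_foldl_merge (ps : List (String × Int)) (d : PySem.Dict String Int) (k : String) :
    (ps.foldl (fun d p => d.insert p.1 (d.getD p.1 0 + p.2)) d).getD k 0
      = d.getD k 0 + ((ps.filter (fun p => p.1 == k)).map Prod.snd).sum := by
  induction ps generalizing d with
  | nil => simp
  | cons p ps ih =>
    simp only [List.foldl_cons, ih, List.filter_cons]
    rw [PySem.Dict.getD_insert]
    by_cases h : p.1 = k
    · simp [h]; omega
    · simp [h, beq_iff_eq, Ne.symm h]

-- merging Counter(l)'s items into d is one counting pass of l over d
theorem foldl_merge_counter (l : List String) (d : PySem.Dict String Int) (hd : d.keys.Nodup) :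
    (PySem.Dict.counter l).items.foldl (fun d p => d.insert p.1 (d.getD p.1 0 + p.2)) d
      = l.foldl (fun d x => d.insert x (d.getD x 0 + 1)) d := by
  have hL : ((PySem.Dict.counter l).items.foldl
      (fun d p => d.insert p.1 (d.getD p.1 0 + p.2)) d).keys.Nodup :=
    PySem.Dict.nodup_keys_foldl_insert_key _ Prod.fst (fun d p => d.getD p.1 0 + p.2) d hd
  have hR : (l.foldl (fun d x => d.insert x (d.getD x 0 + 1)) d).keys.Nodup :=
    PySem.Dict.nodup_keys_foldl_insert l _ d hd
  have hkeys : ((PySem.Dict.counter l).items.foldl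
        (fun d p => d.insert p.1 (d.getD p.1 0 + p.2)) d).keys
      = (l.foldl (fun d x => d.insert x (d.getD x 0 + 1)) d).keys := by
    rw [PySem.Dict.keys_foldl_insert_key _ Prod.fst (fun d p => d.getD p.1 0 + p.2) d,
        PySem.Dict.keys_foldl_insert]
    have : (PySem.Dict.counter l).items.map Prod.fst = PySem.Set.ofList l := by
      rw [show (PySem.Dict.counter l).items.map Prod.fst = (PySem.Dict.counter l).keys from rfl,
          PySem.Dict.keys_counter]
    rw [this, PySem.Set.update_eq_append_filter, PySem.Set.update_eq_append_filter,
        PySem.Set.ofList_ofList]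
  have hgetD : ∀ k, ((PySem.Dict.counter l).items.foldl
        (fun d p => d.insert p.1 (d.getD p.1 0 + p.2)) d).getD k 0
      = (l.foldl (fun d x => d.insert x (d.getD x 0 + 1)) d).getD k 0 := by
    intro k
    rw [getD_foldl_merge, PySem.Dict.getD_foldl_insert_add_one, PySem.Dict.items_counter,
        List.filter_map]
    have hfilter : (PySem.Set.ofList l).filter
        ((fun p : String × Int => p.1 == k) ∘ (fun c => (c, (l.count c : Int))))
        = List.filter (fun x => x == k) (PySem.Set.ofList l) := rfl
    rw [hfilter, List.filter_beq]
    by_cases hk : k ∈ l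
    · rw [List.count_eq_one_of_mem (PySem.Set.nodup_ofList l) (by simpa [PySem.Set.mem_ofList] using hk)]
      simp
    · rw [List.count_eq_zero.mpr (by simp [PySem.Set.mem_ofList, hk]),
          List.count_eq_zero.mpr hk]
      simp
  apply PySem.Dict.ext
  rw [PySem.Dict.items_eq_map_keys _ hL 0, PySem.Dict.items_eq_map_keys _ hR 0, hkeys]
  exact List.map_congr_left fun k _ => by rw [hgetD k]

-- ===== VERDICT (by name: the statement is the Claim_ definition above) =====
theorem double_count_spec : Claim_equal_double_count := by
  intro str1 str2 _
  show _ = _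
  unfold double_count double_count_alt
  dsimp only []
  rw [letter_count_eq str1, letter_count_eq str2]
  rw [show (fun (counts : PySem.Dict String Int) letter =>
        if counts.contains letter = true then counts.insert letter (counts.getD letter 0 + 1)
        else counts.insert letter 1) = lcStep from rfl, lcStep_funext]
  rw [show mergeStep = fun (d : PySem.Dict String Int) p => d.insert p.1 (d.getD p.1 0 + p.2)
        from funext fun d => funext fun p => mergeStep_eq d p]
  rw [List.map_append, List.foldl_append]
  rw [foldl_merge_counter _ _ (PySem.Dict.nodup_keys_counter _)]
  rw [PySem.Dict.foldl_insert_getD_add_one_eq_counter]
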